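-- pv_equiv track=rewrite | github.com/ayukyo/alltoolkit | Python/dna_utils/mod.py | complement_rna
-- ===== SOURCE A (Python) =====
-- class NucleotideError(Exception):
--     """核苷酸相关错误"""
--     pass
--
-- RNA_BASES = set('AUCG')
--
-- RNA_COMPLEMENT = {
--     'A': 'U', 'U': 'A', 'G': 'C', 'C': 'G',
--     'a': 'u', 'u': 'a', 'g': 'c', 'c': 'g',
-- }
--
-- def is_valid_rna(sequence: str) -> bool:
--     """
--     验证序列是否为有效 RNA 序列。
--
--     Args:
--         sequence: 待验证的序列字符串
--
--     Returns:
--         bool: 是否为有效 RNA 序列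
--
--     Example:
--         >>> is_valid_rna("AUCG")
--         True
--         >>> is_valid_rna("ATCG")  # DNA 碱基
--         False
--     """
--     if not sequence:
--         return False
--     valid_bases = RNA_BASES | {'N'}  # 支持 N 作为模糊碱基
--     return all(base.upper() in valid_bases for base in sequence)
--
-- def complement_rna(rna: str) -> str:
--     """
--     生成 RNA 互补链。
--
--     Args:
--         rna: RNA 序列字符串
--
--     Returns:
--         str: 互补 RNA 序列
--
--     Raises:
--         NucleotideError: 如果序列无效
--
--     Example:
--         >>> complement_rna("AUCG")
--         'UAGC'
--     """
--     if not is_valid_rna(rna):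
--         raise NucleotideError(f"无效的 RNA 序列: {rna}")
--
--     result = []
--     for base in rna:
--         if base.upper() in RNA_COMPLEMENT:
--             comp = RNA_COMPLEMENT[base]
--             result.append(comp if base.islower() else comp.upper())
--         else:
--             result.append('N')
--
--     return ''.join(result)
-- ===== SOURCE B (Python) =====
-- class NucleotideError(Exception):
--     pass
--
-- RNA_COMPLEMENT_UPPER = {'A': 'U', 'U': 'A', 'G': 'C', 'C': 'G'}
--
-- def complement_rna(rna: str) -> str:
--     # Single fused pass: validate and build the complement at once.
--     if not rna:
--         raise NucleotideError(f"无效的 RNA 序列: {rna}")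
--     out = []
--     for ch in rna:
--         comp = RNA_COMPLEMENT_UPPER.get(ch.upper())
--         if comp is not None:
--             out.append(comp.lower() if ch.islower() else comp)
--         elif ch.upper() == 'N':
--             out.append('N')
--         else:
--             raise NucleotideError(f"无效的 RNA 序列: {rna}")
--     return ''.join(out)
-- ===== Notes on version B (the rewrite author's own statement) =====
-- stated objective: simpler
-- what changed: B fuses A's separate validation scan and build scan (and A's per-case 8-entry dict plus case re-adjustment) into one pass over the string using a single 4-entry uppercase table, lowering the complement when the input base is lowercase and raising immediately on an invalid base.
import Mathlib
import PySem

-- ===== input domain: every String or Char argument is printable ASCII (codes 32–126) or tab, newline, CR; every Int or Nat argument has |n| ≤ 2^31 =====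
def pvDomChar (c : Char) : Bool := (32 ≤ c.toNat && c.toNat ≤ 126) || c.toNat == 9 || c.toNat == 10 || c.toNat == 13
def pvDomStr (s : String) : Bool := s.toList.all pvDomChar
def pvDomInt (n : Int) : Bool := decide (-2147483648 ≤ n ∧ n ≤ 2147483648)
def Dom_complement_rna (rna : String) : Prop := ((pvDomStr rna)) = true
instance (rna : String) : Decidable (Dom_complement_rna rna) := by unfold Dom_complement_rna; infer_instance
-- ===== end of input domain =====

-- B fuses A's validation pass and build pass into one scan with a single uppercase table (objective: simpler).
-- Both Pythons raise NucleotideError on invalid sequences; those inputs are outside Pre_ (the ports return "" there).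

-- ===== PORT A =====
def pvRnaBases : PySem.Set Char := PySem.Set.ofList ['A', 'U', 'C', 'G']

def pvRnaComplement : PySem.Dict Char Char :=
  PySem.Dict.mk [('A','U'),('U','A'),('G','C'),('C','G'),('a','u'),('u','a'),('g','c'),('c','g')]

def pvIsValidRna (sequence : String) : Bool :=
  if sequence.toList = [] then false
  else sequence.toList.all
    (fun base => PySem.Set.contains (PySem.Set.union pvRnaBases ['N']) (PySem.Chars.upperChar base))

-- one loop step of A's build loop (base.upper() in RNA_COMPLEMENT; lookup keyed by the original char)
def pvStepA (base : Char) : Char :=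
  if (pvRnaComplement.get? (PySem.Chars.upperChar base)).isSome then
    -- KeyError impossible here: membership of base.upper() implies base itself is a key; getD default never read
    let comp := pvRnaComplement.getD base '?'
    if PySem.Chars.islower base then comp else PySem.Chars.upperChar comp
  else 'N'

def complement_rna (rna : String) : String :=
  if pvIsValidRna rna = false then ""   -- Python: raise NucleotideError (outside Pre_)
  else String.ofList (rna.toList.foldl (fun result base => result ++ [pvStepA base]) [])

-- ===== PORT B =====
def pvRnaComplementUpper : PySem.Dict Char Char :=
  PySem.Dict.mk [('A','U'),('U','A'),('G','C'),('C','G')]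

-- one loop step of B: some c = append c, none = raise NucleotideError
def pvStepB (ch : Char) : Option Char :=
  match pvRnaComplementUpper.get? (PySem.Chars.upperChar ch) with
  | some comp => some (if PySem.Chars.islower ch then PySem.Chars.lowerChar comp else comp)
  | none => if PySem.Chars.upperChar ch == 'N' then some 'N' else none

def pvCompGo (cs : List Char) : Option (List Char) :=
  match cs with
  | [] => some []
  | c :: rest =>
    match pvStepB c with
    | some x => (pvCompGo rest).map (fun t => x :: t)
    | none => none   -- raise NucleotideError (outside Pre_)

def complement_rna_alt (rna : String) : String :=
  if rna.toList = [] then ""   -- raise NucleotideError (outside Pre_)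
  else
    match pvCompGo rna.toList with
    | some out => String.ofList out
    | none => ""   -- raise NucleotideError (outside Pre_)

-- ===== PRECONDITION & SPEC =====
-- Pre_ = exactly the sequences A accepts: nonempty, every base one of A/U/C/G/N (either case); elsewhere both Pythons raise NucleotideError.
def Pre_complement_rna (rna : String) : Prop :=
  rna.toList ≠ [] ∧
    rna.toList.all (fun c => ['A', 'U', 'C', 'G', 'N'].contains (PySem.Chars.upperChar c)) = true
instance (rna : String) : Decidable (Pre_complement_rna rna) := by unfold Pre_complement_rna; infer_instance

def pvWitness_complement_rna : String := "AuCgN"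

def Spec_complement_rna (rna : String) (out : String) : Prop := out = complement_rna_alt rna
instance (rna : String) (out : String) : Decidable (Spec_complement_rna rna out) := by unfold Spec_complement_rna; infer_instance

-- ===== CLAIM (what is proved, stated in full; the proofs are below) =====
def Claim_equal_complement_rna : Prop := ∀ (rna : String), Dom_complement_rna rna → Pre_complement_rna rna → Spec_complement_rna rna (complement_rna rna)

-- ===== LEMMAS AND PROOFS =====

-- per-character agreement, checked exhaustively over the ASCII domain
theorem pvStep_agree_ofNat : ∀ n < 127,
    (fun c => PySem.Chars.upperChar c ∈ ['A', 'U', 'C', 'G', 'N'] → pvStepB c = some (pvStepA c))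
      (Char.ofNat n) := by decide

theorem pvStep_agree (c : Char) (hd : pvDomChar c = true)
    (hv : PySem.Chars.upperChar c ∈ ['A', 'U', 'C', 'G', 'N']) :
    pvStepB c = some (pvStepA c) := by
  have hn : c.toNat < 127 := by
    simp [pvDomChar] at hd
    omega
  have := pvStep_agree_ofNat c.toNat hn
  rw [Char.ofNat_toNat] at this
  exact this hv

theorem pvCompGo_eq_map (cs : List Char) (hd : cs.all pvDomChar = true)
    (hv : ∀ c ∈ cs, PySem.Chars.upperChar c ∈ ['A', 'U', 'C', 'G', 'N']) :
    pvCompGo cs = some (cs.map pvStepA) := by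
  induction cs with
  | nil => rfl
  | cons c rest ih =>
    simp only [List.all_cons, Bool.and_eq_true] at hd
    have hstep := pvStep_agree c hd.1 (hv c (by simp))
    simp only [pvCompGo, hstep, ih hd.2 (fun x hx => hv x (by simp [hx])), Option.map,
      List.map_cons]

theorem pvIsValidRna_of_pre (rna : String) (h : Pre_complement_rna rna) :
    pvIsValidRna rna = true := by
  obtain ⟨hne, hv'⟩ := h
  have hv : ∀ c ∈ rna.toList, PySem.Chars.upperChar c ∈ ['A', 'U', 'C', 'G', 'N'] := by
    simpa using hv'
  simp only [pvIsValidRna, if_neg hne, List.all_eq_true]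
  intro c hc
  have h5 := hv c hc
  simp only [List.mem_cons, List.not_mem_nil, or_false] at h5
  -- Set.union pvRnaBases ['N'] computes to the literal list ['A','U','C','G','N']
  rcases h5 with h | h | h | h | h <;> rw [h] <;> decide

-- ===== VERDICT (by name: the statement is the Claim_ definition above) =====
theorem complement_rna_spec : Claim_equal_complement_rna := by
  intro rna hdom hpre
  have hv : ∀ c ∈ rna.toList, PySem.Chars.upperChar c ∈ ['A', 'U', 'C', 'G', 'N'] := by
    simpa using hpre.2
  unfold Spec_complement_rna complement_rna complement_rna_alt
  rw [pvIsValidRna_of_pre rna hpre]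
  rw [if_neg hpre.1, PySem.List.foldl_append_singleton_eq_map,
    pvCompGo_eq_map rna.toList hdom hv]
  simp
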